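-- pv_equiv track=rewrite | github.com/dhruvbhaskar07/Winter-AI-Assistant | src/utils/wake_word.py | _is_wake_text
-- ===== SOURCE A (Python) =====
-- WAKE_WORD = "hey winter"
--
-- def _is_wake_text(text):
--     lowered = str(text).strip().lower()
--     if not lowered:
--         return False
--
--     if WAKE_WORD in lowered:
--         return True
--
--     # Common speech-to-text variants: "a winter", "hi winter", "winter"
--     wake_variants = ("hi winter", "hey winter", "a winter", "winter")
--     return any(variant in lowered for variant in wake_variants)
-- ===== SOURCE B (Python) =====
-- def _is_wake_text(text):
--     # Every wake variant contains "winter", so one membership test suffices.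
--     return "winter" in str(text).strip().lower()
-- ===== Notes on version B (the rewrite author's own statement) =====
-- stated objective: simpler
-- what changed: Replaced the empty-string guard, WAKE_WORD check and variant loop by a single substring test for 'winter', which all variants contain.
import Mathlib
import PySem

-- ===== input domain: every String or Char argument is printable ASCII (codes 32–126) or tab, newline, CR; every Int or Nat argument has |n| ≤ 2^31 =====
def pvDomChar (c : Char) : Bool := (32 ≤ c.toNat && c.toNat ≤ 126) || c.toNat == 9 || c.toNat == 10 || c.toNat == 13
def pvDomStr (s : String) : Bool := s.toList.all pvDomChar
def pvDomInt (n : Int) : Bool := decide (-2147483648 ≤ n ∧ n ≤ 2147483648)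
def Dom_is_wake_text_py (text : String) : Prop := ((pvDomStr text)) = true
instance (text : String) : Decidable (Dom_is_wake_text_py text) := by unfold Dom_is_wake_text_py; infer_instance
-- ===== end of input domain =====

-- ===== PORT A =====
-- B changes: a single 'winter' membership test replaces the guard + variant loop (objective: simpler).
def is_wake_text_py (text : String) : Bool :=
  let lowered := PySem.Str.lower (PySem.Str.strip text)
  if PySem.Str.len lowered = 0 then false
  else if PySem.Str.isIn "hey winter" lowered then true
  else ["hi winter", "hey winter", "a winter", "winter"].any (fun v => PySem.Str.isIn v lowered)

-- ===== PORT B =====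
def is_wake_text_py_alt (text : String) : Bool :=
  PySem.Str.isIn "winter" (PySem.Str.lower (PySem.Str.strip text))

-- ===== PRECONDITION & SPEC =====
def Spec_is_wake_text_py (text : String) (out : Bool) : Prop := out = is_wake_text_py_alt text
instance (text : String) (out : Bool) : Decidable (Spec_is_wake_text_py text out) := by unfold Spec_is_wake_text_py; infer_instance

-- ===== CLAIM (what is proved, stated in full; the proofs are below) =====
def Claim_equal_is_wake_text_py : Prop := ∀ (text : String), Dom_is_wake_text_py text → Spec_is_wake_text_py text (is_wake_text_py text)

-- ===== LEMMAS AND PROOFS =====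

-- ===== VERDICT (by name: the statement is the Claim_ definition above) =====
-- each wake variant contains "winter" as a substring
theorem winter_of_variant (v : List Char) (l : List Char)
    (hv : v ∈ [("hi winter" : String).toList, ("hey winter" : String).toList,
               ("a winter" : String).toList, ("winter" : String).toList])
    (h : PySem.Chars.isIn v l = true) : PySem.Chars.isIn ("winter" : String).toList l = true := by
  rw [PySem.Chars.isIn_iff_infix] at h ⊢
  fin_cases hv
  · exact List.IsInfix.trans (by decide) h
  · exact List.IsInfix.trans (by decide) h
  · exact List.IsInfix.trans (by decide) h
  · exact h

theorem is_wake_text_py_spec : Claim_equal_is_wake_text_py := by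
  intro text _
  unfold Spec_is_wake_text_py is_wake_text_py is_wake_text_py_alt
  set l := PySem.Str.lower (PySem.Str.strip text) with hl
  by_cases hw : PySem.Str.isIn "winter" l = true
  · -- "winter" present: l nonempty, "hey winter" branch or the variant list succeeds either way
    have hinf : ("winter" : String).toList <:+: l.toList := by
      rw [← PySem.Str.isIn_iff_infix]; exact hw
    have hlen : PySem.Str.len l ≠ 0 := by
      intro h0
      have hnil : l.toList = [] := by
        have he := PySem.Str.len_eq l
        rw [h0] at he
        exact List.eq_nil_of_length_eq_zero (by exact_mod_cast he.symm)
      rw [hnil] at hinf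
      have := List.eq_nil_of_infix_nil hinf
      simp at this
    rw [if_neg hlen]
    by_cases hh : PySem.Str.isIn "hey winter" l = true
    · rw [if_pos hh, hw]
    · rw [if_neg hh]
      rw [hw]
      simp only [List.any, Bool.or_eq_true]
      right; right; right
      simpa using hw
  · -- "winter" absent: no variant present, both sides false
    have hwl : PySem.Str.isIn "winter" l = false := by
      cases h : PySem.Str.isIn "winter" l
      · rfl
      · exact absurd h hw
    have hnv : ∀ v : String, v ∈ (["hi winter", "hey winter", "a winter", "winter"] : List String) →
        PySem.Str.isIn v l = false := by
      intro v hv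
      cases h : PySem.Str.isIn v l
      · rfl
      · exfalso; apply hw
        rw [PySem.Str.isIn_eq] at h ⊢
        exact winter_of_variant v.toList l.toList (by fin_cases hv <;> simp) h
    rw [hwl]
    by_cases h0 : PySem.Str.len l = 0
    · rw [if_pos h0]
    · rw [if_neg h0, if_neg (by simpa using hnv "hey winter" (by simp))]
      simp only [List.any_eq_false]
      intro v hv h
      rw [hnv v hv] at h
      exact Bool.noConfusion h
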